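-- pv_equiv track=rewrite | github.com/asyahril-sha/MYLOVE-V1 | core/intent_analyzer.py | _get_primary_intent
-- ===== SOURCE A (Python) =====
-- from typing import Dict, List, Optional, Any, Tuple
-- from enum import Enum
--
-- class UserIntent(str, Enum):
--     """Intent user yang terdeteksi"""
--     GREETING = "greeting"               # Menyapa
--     FAREWELL = "farewell"                # Pamit
--     QUESTION = "question"                # Bertanya
--     ANSWER = "answer"                    # Menjawab
--     CHIT_CHAT = "chit_chat"              # Ngobrol biasa
--     FLIRT = "flirt"                       # Menggoda
--     COMPLIMENT = "compliment"              # Memuji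
--     SEXUAL = "sexual"                      # Ajakan intim
--     CURHAT = "curhat"                      # Curhat
--     CONFESSION = "confession"               # Mengaku perasaan
--     JEALOUSY = "jealousy"                   # Cemburu
--     ANGRY = "angry"                         # Marah
--     SAD = "sad"                             # Sedih
--     HAPPY = "happy"                         # Senang
--     BORED = "bored"                         # Bosan
--     CURIOUS = "curious"                      # Penasaran
--     SHY = "shy"                             # Malu
--     PLAYFUL = "playful"                      # Main-main
--     NOSTALGIC = "nostalgic"                  # Nostalgia
--     HOPEFUL = "hopeful"                      # Penuh harap
--     WORRIED = "worried"                      # Khawatir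
--     APOLOGETIC = "apologetic"                # Minta maaf
--     GRATEFUL = "grateful"                    # Berterima kasih
--     SARCASTIC = "sarcastic"                  # Sarkas
--     JOKING = "joking"                        # Bercanda
--     IGNORING = "ignoring"                    # Mengabaikan
--     CHANGING_TOPIC = "changing_topic"         # Ganti topik
--
-- def _get_primary_intent(intents: List[UserIntent], message_lower: str) -> UserIntent:
--     """
--     Tentukan intent utama dari pesan
--     """
--     # Priority intent (higher priority first)
--     priority = [
--         UserIntent.SEXUAL,
--         UserIntent.CONFESSION,
--         UserIntent.FLIRT,
--         UserIntent.ANGRY,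
--         UserIntent.SAD,
--         UserIntent.JEALOUSY,
--         UserIntent.CURHAT,
--         UserIntent.QUESTION,
--         UserIntent.FAREWELL,
--         UserIntent.GREETING,
--         UserIntent.COMPLIMENT,
--         UserIntent.PLAYFUL,
--         UserIntent.JOKING,
--         UserIntent.CHIT_CHAT
--     ]
--
--     for p in priority:
--         if p in intents:
--             return p
--
--     return UserIntent.CHIT_CHAT
-- ===== SOURCE B (Python) =====
-- from typing import List
-- from enum import Enum
--
-- class UserIntent(str, Enum):
--     GREETING = "greeting"
--     FAREWELL = "farewell"
--     QUESTION = "question"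
--     ANSWER = "answer"
--     CHIT_CHAT = "chit_chat"
--     FLIRT = "flirt"
--     COMPLIMENT = "compliment"
--     SEXUAL = "sexual"
--     CURHAT = "curhat"
--     CONFESSION = "confession"
--     JEALOUSY = "jealousy"
--     ANGRY = "angry"
--     SAD = "sad"
--     HAPPY = "happy"
--     BORED = "bored"
--     CURIOUS = "curious"
--     SHY = "shy"
--     PLAYFUL = "playful"
--     NOSTALGIC = "nostalgic"
--     HOPEFUL = "hopeful"
--     WORRIED = "worried"
--     APOLOGETIC = "apologetic"
--     GRATEFUL = "grateful"
--     SARCASTIC = "sarcastic"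
--     JOKING = "joking"
--     IGNORING = "ignoring"
--     CHANGING_TOPIC = "changing_topic"
--
-- _PRIORITY = [
--     UserIntent.SEXUAL,
--     UserIntent.CONFESSION,
--     UserIntent.FLIRT,
--     UserIntent.ANGRY,
--     UserIntent.SAD,
--     UserIntent.JEALOUSY,
--     UserIntent.CURHAT,
--     UserIntent.QUESTION,
--     UserIntent.FAREWELL,
--     UserIntent.GREETING,
--     UserIntent.COMPLIMENT,
--     UserIntent.PLAYFUL,
--     UserIntent.JOKING,
--     UserIntent.CHIT_CHAT,
-- ]
--
-- _RANK = {p: i for i, p in enumerate(_PRIORITY)}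
--
--
-- def _get_primary_intent(intents: List[UserIntent], message_lower: str) -> UserIntent:
--     """Single pass over the input: keep the intent with the minimum priority rank."""
--     best = None
--     best_rank = len(_PRIORITY)
--     for it in intents:
--         r = _RANK.get(it, len(_PRIORITY))
--         if r < best_rank:
--             best_rank = r
--             best = it
--     return best if best is not None else UserIntent.CHIT_CHAT
-- ===== Notes on version B (the rewrite author's own statement) =====
-- stated objective: idiomatic
-- what changed: B precomputes a rank dict from the fixed priority list and makes a single pass over the input intents tracking the minimum-rank one, instead of A's loop over the priority list with a membership test on the input per priority.
import Mathlib
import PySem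

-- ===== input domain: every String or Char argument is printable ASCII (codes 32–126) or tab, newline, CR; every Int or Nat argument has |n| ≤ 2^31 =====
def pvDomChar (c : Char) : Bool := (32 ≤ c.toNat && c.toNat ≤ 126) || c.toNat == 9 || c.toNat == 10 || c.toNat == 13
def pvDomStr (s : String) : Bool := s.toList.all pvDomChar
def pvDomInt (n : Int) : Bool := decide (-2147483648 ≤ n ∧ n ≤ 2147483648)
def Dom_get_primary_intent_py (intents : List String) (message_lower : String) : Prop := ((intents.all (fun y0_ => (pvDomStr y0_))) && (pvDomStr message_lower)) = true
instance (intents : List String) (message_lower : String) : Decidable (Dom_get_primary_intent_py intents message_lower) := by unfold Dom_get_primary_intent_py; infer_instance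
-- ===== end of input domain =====

-- B replaces A's scan over the fixed priority list (one membership test on the input per
-- priority) by a single pass over the input intents keeping the minimum-rank one, with
-- ranks taken from a dict precomputed from the priority list (objective: idiomatic).

-- ===== PORT A =====
-- the priority list of A (the UserIntent string values, in A's order)
def pvPriority : List String :=
  ["sexual", "confession", "flirt", "angry", "sad", "jealousy", "curhat",
   "question", "farewell", "greeting", "compliment", "playful", "joking", "chit_chat"]

-- 'for p in priority: if p in intents: return p' then the default
def pvLoopA (intents : List String) : List String → String
  | [] => "chit_chat"
  | p :: rest => if intents.contains p then p else pvLoopA intents rest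

def get_primary_intent_py (intents : List String) (message_lower : String) : String :=
  pvLoopA intents pvPriority

-- ===== PORT B =====
-- _RANK = {p: i for i, p in enumerate(_PRIORITY)}
def pvRank : PySem.Dict String Int :=
  (PySem.List.enumerate pvPriority).foldl (fun d ip => d.insert ip.2 ip.1) PySem.Dict.empty

-- single pass over intents: keep (best, best_rank); return best, or the default if none
def get_primary_intent_py_alt (intents : List String) (message_lower : String) : String :=
  let n : Int := PySem.List.len pvPriority
  let st := intents.foldl
    (fun (st : Option String × Int) it =>
      let r := pvRank.getD it n
      if r < st.2 then (some it, r) else st)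
    ((none : Option String), n)
  match st.1 with
  | some b => b
  | none => "chit_chat"

-- ===== PRECONDITION & SPEC =====
def Spec_get_primary_intent_py (intents : List String) (message_lower : String) (out : String) : Prop := out = get_primary_intent_py_alt intents message_lower
instance (intents : List String) (message_lower : String) (out : String) : Decidable (Spec_get_primary_intent_py intents message_lower out) := by unfold Spec_get_primary_intent_py; infer_instance

-- ===== CLAIM (what is proved, stated in full; the proofs are below) =====
def Claim_equal_get_primary_intent_py : Prop := ∀ (intents : List String) (message_lower : String), Dom_get_primary_intent_py intents message_lower → Spec_get_primary_intent_py intents message_lower (get_primary_intent_py intents message_lower)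

-- ===== LEMMAS AND PROOFS =====

-- rank of s in a list of strings (= length of the list if absent)
def rkAux (s : String) : List String → Nat
  | [] => 0
  | q :: Q => if q = s then 0 else rkAux s Q + 1

def rk (s : String) : Nat := rkAux s pvPriority

-- the association list pvRank's fold builds, as a structural function
def mkPairs : List String → Int → List (String × Int)
  | [], _ => []
  | q :: Q, i => (q, i) :: mkPairs Q (i + 1)

def rkOpt : Option String → Int
  | none => 14
  | some q => (rk q : Int)

-- B's loop body, with the dict lookup replaced by rk (justified by rank_eq)
def pvStep (st : Option String × Int) (it : String) : Option String × Int :=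
  if (rk it : Int) < st.2 then (some it, (rk it : Int)) else st

lemma rkAux_le (s : String) (Q : List String) : rkAux s Q ≤ Q.length := by
  induction Q with
  | nil => simp [rkAux]
  | cons q Q ih => simp only [rkAux, List.length_cons]; split_ifs <;> omega

lemma rkAux_lt_iff (s : String) (Q : List String) : rkAux s Q < Q.length ↔ s ∈ Q := by
  induction Q with
  | nil => simp [rkAux]
  | cons q Q ih =>
    simp only [rkAux, List.length_cons, List.mem_cons]
    split_ifs with h
    · simpa using Or.inl h.symm
    · have := rkAux_le s Q
      constructor
      · intro hlt; exact Or.inr (ih.mp (by omega))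
      · rintro (rfl | hm)
        · exact absurd rfl h
        · have := ih.mpr hm; omega

lemma rkAux_cons_ne (s q : String) (Q : List String) (h : q ≠ s) :
    rkAux s (q :: Q) = rkAux s Q + 1 := by simp [rkAux, h]

lemma getD_mkPairs (s : String) (Q : List String) : ∀ (i : Int),
    (PySem.Dict.mk (mkPairs Q i)).getD s 14 = if s ∈ Q then i + (rkAux s Q : Int) else 14 := by
  induction Q with
  | nil => intro i; simp [mkPairs, PySem.Dict.getD, PySem.Dict.get?]
  | cons q Q ih =>
    intro i
    simp only [mkPairs, PySem.Dict.getD, PySem.Dict.get?_mk_cons, beq_iff_eq, rkAux, List.mem_cons]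
    by_cases h : q = s
    · simp [h]
    · have := ih (i + 1)
      simp only [PySem.Dict.getD] at this
      simp only [h, if_false, this]
      by_cases hm : s ∈ Q
      · simp [hm, Ne.symm h]; ring
      · simp [hm]; intro hh; exact absurd hh.symm h

lemma pvRank_eq_mkPairs : pvRank = PySem.Dict.mk (mkPairs pvPriority 0) := by rfl

lemma rank_eq (s : String) : pvRank.getD s 14 = (rk s : Int) := by
  rw [pvRank_eq_mkPairs, getD_mkPairs]
  by_cases hm : s ∈ pvPriority
  · simp [hm, rk]
  · have h1 := rkAux_le s pvPriority
    have h2 := (rkAux_lt_iff s pvPriority).not.2 (by simpa using hm)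
    simp only [hm, if_false, rk]
    have : rkAux s pvPriority = 14 := by
      have : pvPriority.length = 14 := by decide
      omega
    simp [this]

-- key lemma: extending the "seen" intents by x updates A's find? by a min-rank step
lemma find?_append_singleton (Q : List String) (hQ : Q.Nodup) (t : List String) (x : String) :
    Q.find? (fun p => (t ++ [x]).contains p) =
      (match Q.find? (fun p => t.contains p) with
       | none => if Q.contains x then some x else none
       | some q => if rkAux x Q < rkAux q Q then some x else some q) := by
  induction Q with
  | nil => simp
  | cons q0 Q ih =>
    obtain ⟨hq0, hQ'⟩ := List.nodup_cons.mp hQ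
    simp only [List.find?_cons]
    by_cases h1 : q0 ∈ t
    · simp [h1, rkAux]
    · by_cases h2 : q0 = x
      · subst h2
        cases ho : Q.find? (fun p => t.contains p) with
        | none => simp [h1, rkAux]
        | some q =>
          have hqQ : q ∈ Q := List.mem_of_find?_eq_some ho
          have hne : q0 ≠ q := fun h => hq0 (h ▸ hqQ)
          simp [h1, rkAux, hne, fun h : q = q0 => hne h.symm]
      · simp only [List.contains_eq_mem, List.mem_append, List.mem_singleton,
          Bool.decide_or] at ih ⊢
        cases ho : Q.find? (fun p => decide (p ∈ t)) with
        | none =>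
          have hxq : ¬ x = q0 := fun h => h2 h.symm
          rw [ih hQ', ho]
          by_cases hx : x ∈ Q <;> simp [hx, h1, h2, hxq]
        | some q =>
          have hqQ : q ∈ Q := List.mem_of_find?_eq_some ho
          have hne : q0 ≠ q := fun h => hq0 (h ▸ hqQ)
          simp only [ih hQ', ho, h1, h2, decide_eq_true_eq, Bool.false_or,
            decide_false, List.mem_cons]
          rw [rkAux_cons_ne x q0 Q h2, rkAux_cons_ne q q0 Q hne]
          simp [Nat.add_lt_add_iff_right]

lemma pvPriority_nodup : pvPriority.Nodup := by decide

lemma pvStep_eq (t : List String) (b : Option String) (x : String)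
    (hb : b = pvPriority.find? (fun p => t.contains p)) :
    pvStep (b, rkOpt b) x = ((pvPriority.find? (fun p => (t ++ [x]).contains p)),
      rkOpt (pvPriority.find? (fun p => (t ++ [x]).contains p))) := by
  rw [find?_append_singleton pvPriority pvPriority_nodup t x, ← hb]
  cases b with
  | none =>
    by_cases hc : x ∈ pvPriority
    · have h1 : rk x < 14 := by
        have := (rkAux_lt_iff x pvPriority).mpr hc
        simpa [rk] using this
      simp [pvStep, rkOpt, List.contains_eq_mem, hc, rk]
      exact_mod_cast h1
    · have h1 : rk x = 14 := by
        have h2 := rkAux_le x pvPriority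
        have h3 := (rkAux_lt_iff x pvPriority).not.2 hc
        have : pvPriority.length = 14 := by decide
        simp only [rk]; omega
      simp [pvStep, rkOpt, List.contains_eq_mem, hc, h1]
  | some q =>
    simp only [pvStep, rkOpt, rk, Nat.cast_lt]
    by_cases h : rkAux x pvPriority < rkAux q pvPriority <;> simp [h, rkOpt]

-- loop invariant of B's single pass: the state is A's find? over the intents seen so far
lemma foldB (l : List String) : ∀ (t : List String) (b : Option String),
    b = pvPriority.find? (fun p => t.contains p) →
    l.foldl pvStep (b, rkOpt b) =
      ((pvPriority.find? (fun p => (t ++ l).contains p)),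
       rkOpt (pvPriority.find? (fun p => (t ++ l).contains p))) := by
  induction l with
  | nil => intro t b hb; simp [hb]
  | cons x l ih =>
    intro t b hb
    rw [List.foldl_cons, pvStep_eq t b x hb, ih (t ++ [x]) _ rfl]
    simp

lemma loopA_eq_find (intents : List String) (Q : List String) :
    pvLoopA intents Q = (Q.find? (fun p => intents.contains p)).getD "chit_chat" := by
  induction Q with
  | nil => simp [pvLoopA]
  | cons q Q ih =>
    simp only [pvLoopA, List.find?_cons]
    by_cases h : q ∈ intents <;> simp [h, ih]

-- ===== VERDICT (by name: the statement is the Claim_ definition above) =====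
theorem get_primary_intent_py_spec : Claim_equal_get_primary_intent_py := by
  intro intents message_lower _hdom
  unfold Spec_get_primary_intent_py
  have hf : (fun (st : Option String × Int) it =>
      let r := pvRank.getD it (14 : Int)
      if r < st.2 then (some it, r) else st) = pvStep := by
    funext st it
    simp only [rank_eq, pvStep]
  have h0 : (none : Option String) = pvPriority.find? (fun p => ([] : List String).contains p) :=
    (List.find?_eq_none.mpr (by intro x hx; simp)).symm
  have hfold := foldB intents [] none h0
  simp only [List.nil_append] at hfold
  have hrk : rkOpt none = (14 : Int) := rfl
  rw [hrk] at hfold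
  have hn : PySem.List.len pvPriority = 14 := by decide
  unfold get_primary_intent_py get_primary_intent_py_alt
  rw [loopA_eq_find]
  simp only [hn, hf, hfold]
  cases pvPriority.find? (fun p => intents.contains p) <;> rfl
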